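-- pv_equiv track=rewrite | github.com/Taekyo-Lee/sw_expert_academy | problem_bank/25478/python/stress_test3.py | gen_proper_interval_with_twins
-- ===== SOURCE A (Python) =====
-- def gen_proper_interval_from_positions(positions, D):
--     """Generate proper interval graph from sorted positions and distance D."""
--     N = len(positions)
--     A = [[0]*N for _ in range(N)]
--     for i in range(N):
--         A[i][i] = 1
--         for j in range(i+1, N):
--             if abs(positions[i] - positions[j]) <= D:
--                 A[i][j] = 1
--                 A[j][i] = 1
--     return A
--
-- def gen_proper_interval_with_twins(N, D, twin_class_sizes):
--     """Generate a proper interval graph with specific twin class structure.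
--     twin_class_sizes: list of sizes that sum to N.
--     Twins must be consecutive and within distance D of each other,
--     and have identical neighborhoods.
--     """
--     assert sum(twin_class_sizes) == N
--     # Place twin classes with specific spacing
--     positions = []
--     pos = 1
--     for sz in twin_class_sizes:
--         # Place sz vertices at consecutive positions (gap = 1 between them)
--         for k in range(sz):
--             positions.append(pos + k)
--         pos += sz + D  # Next class starts D+1 after last vertex of this class
--     return gen_proper_interval_from_positions(positions, D)
-- ===== SOURCE B (Python) =====
-- def gen_proper_interval_with_twins(N, D, twin_class_sizes):
--     """Generate a proper interval graph with specific twin class structure.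
--     Same positions layout as the original; the adjacency matrix is then built
--     from the sorted order of the positions with a monotone two-pointer window
--     (reach), instead of testing abs() on every pair."""
--     assert sum(twin_class_sizes) == N
--     positions = []
--     pos = 1
--     for sz in twin_class_sizes:
--         for k in range(sz):
--             positions.append(pos + k)
--         pos += sz + D
--     n = len(positions)
--     order = sorted(range(n), key=lambda i: positions[i])
--     q = [positions[i] for i in order]
--     rank = [0] * n
--     for a in range(n):
--         rank[order[a]] = a
--     # reach[a] = last index (in sorted order) still within distance D of a
--     reach = [0] * n
--     r = 0
--     for a in range(n):
--         if r < a: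
--             r = a
--         while r + 1 < n and q[r + 1] - q[a] <= D:
--             r += 1
--         reach[a] = r
--     return [[1 if i == j or max(rank[i], rank[j]) <= reach[min(rank[i], rank[j])] else 0
--              for j in range(n)] for i in range(n)]
-- ===== Notes on version B (the rewrite author's own statement) =====
-- stated objective: alternative
-- what changed: The all-pairs abs() test with symmetric in-place marking is replaced by sorting the vertex indices by position, computing for each sorted index the furthest reachable sorted index with a monotone two-pointer window (reach array), and then emitting each matrix entry directly from a rank/reach window test.
import Mathlib
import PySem

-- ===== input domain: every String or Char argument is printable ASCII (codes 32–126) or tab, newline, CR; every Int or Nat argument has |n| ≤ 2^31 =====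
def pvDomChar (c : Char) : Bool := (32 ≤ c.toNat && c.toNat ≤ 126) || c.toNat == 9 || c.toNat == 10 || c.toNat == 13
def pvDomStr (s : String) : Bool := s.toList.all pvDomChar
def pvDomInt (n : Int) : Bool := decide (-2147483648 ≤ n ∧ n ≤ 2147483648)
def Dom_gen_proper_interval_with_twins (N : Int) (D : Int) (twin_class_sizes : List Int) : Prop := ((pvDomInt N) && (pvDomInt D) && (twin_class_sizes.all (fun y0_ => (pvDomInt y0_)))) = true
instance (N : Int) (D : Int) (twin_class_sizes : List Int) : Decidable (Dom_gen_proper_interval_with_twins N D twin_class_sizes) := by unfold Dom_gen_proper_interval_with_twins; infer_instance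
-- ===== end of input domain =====

-- B keeps A's positions layout but builds the adjacency matrix from the sorted order of the
-- positions with a monotone two-pointer window (rank/reach), instead of testing abs() on all pairs.

-- shared helper: the positions layout loop, identical source code in A and in B
-- (for sz in twin_class_sizes: for k in range(sz): positions.append(pos+k); pos += sz + D)
def pvPositions (D : Int) (twin_class_sizes : List Int) : List Int :=
  (twin_class_sizes.foldl
    (fun (st : List Int × Int) sz =>
      ((PySem.List.pyRange 0 sz 1).foldl (fun ps k => ps ++ [st.2 + k]) st.1, st.2 + sz + D))
    ([], 1)).1

-- ===== PORT A =====
-- A[i][j] = 1 (list assignment; indices here always come from range(len) so they are in range)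
def pvSet1 (M : List (List Int)) (i j : Nat) : List (List Int) :=
  M.set i ((M.getD i []).set j 1)

def gen_proper_interval_from_positions (positions : List Int) (D : Int) : List (List Int) :=
  let N := positions.length
  let A0 := List.replicate N (List.replicate N (0 : Int))
  -- for i in range(N): A[i][i] = 1; for j in range(i+1, N): if abs(...) <= D: A[i][j]=A[j][i]=1
  (List.range N).foldl
    (fun A i =>
      (List.range' (i + 1) (N - (i + 1))).foldl
        (fun A j =>
          if |positions.getD i 0 - positions.getD j 0| ≤ D then pvSet1 (pvSet1 A i j) j i else A)
        (pvSet1 A i i))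
    A0

def gen_proper_interval_with_twins (N : Int) (D : Int) (twin_class_sizes : List Int) : List (List Int) :=
  -- assert sum(twin_class_sizes) == N  → raises unless Pre_ holds; the port continues as Python does after a passing assert
  gen_proper_interval_from_positions (pvPositions D twin_class_sizes) D

-- ===== PORT B =====
-- while r + 1 < n and q[r+1] - q[a] <= D: r += 1
def pvAdvance (q : List Int) (n : Nat) (D qa : Int) (r : Nat) : Nat :=
  if h : r + 1 < n ∧ q.getD (r + 1) 0 - qa ≤ D then pvAdvance q n D qa (r + 1) else r
  termination_by n - r
  decreasing_by omega

def gen_proper_interval_with_twins_alt (N : Int) (D : Int) (twin_class_sizes : List Int) : List (List Int) :=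
  -- assert sum(twin_class_sizes) == N  (same as A; Pre_ admits exactly the passing inputs)
  let positions := pvPositions D twin_class_sizes
  let n := positions.length
  let order := PySem.List.sorted (List.range n) (fun i => positions.getD i 0) false
  let q := order.map (fun i => positions.getD i 0)
  let rank := (List.range n).foldl (fun rk a => rk.set (order.getD a 0) a) (List.replicate n 0)
  let reach := ((List.range n).foldl
    (fun (st : List Nat × Nat) a =>
      let r0 := max st.2 a                -- if r < a: r = a
      let r1 := pvAdvance q n D (q.getD a 0) r0
      (st.1.set a r1, r1))
    (List.replicate n 0, 0)).1
  (List.range n).map (fun i => (List.range n).map (fun j =>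
    if i = j ∨ max (rank.getD i 0) (rank.getD j 0) ≤ reach.getD (min (rank.getD i 0) (rank.getD j 0)) 0
    then (1 : Int) else 0))

-- ===== PRECONDITION & SPEC =====
-- A (and B) assert sum(twin_class_sizes) == N and raise AssertionError otherwise; Pre_ excludes exactly those raising inputs.
def Pre_gen_proper_interval_with_twins (N : Int) (D : Int) (twin_class_sizes : List Int) : Prop :=
  twin_class_sizes.sum = N
instance (N : Int) (D : Int) (twin_class_sizes : List Int) : Decidable (Pre_gen_proper_interval_with_twins N D twin_class_sizes) := by unfold Pre_gen_proper_interval_with_twins; infer_instance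

def pvWitness_gen_proper_interval_with_twins : Int × Int × List Int := (4, 1, [2, 2])

def Spec_gen_proper_interval_with_twins (N : Int) (D : Int) (twin_class_sizes : List Int) (out : List (List Int)) : Prop := out = gen_proper_interval_with_twins_alt N D twin_class_sizes
instance (N : Int) (D : Int) (twin_class_sizes : List Int) (out : List (List Int)) : Decidable (Spec_gen_proper_interval_with_twins N D twin_class_sizes out) := by unfold Spec_gen_proper_interval_with_twins; infer_instance

-- ===== CLAIM (what is proved, stated in full; the proofs are below) =====
def Claim_equal_gen_proper_interval_with_twins : Prop := ∀ (N : Int) (D : Int) (twin_class_sizes : List Int), Dom_gen_proper_interval_with_twins N D twin_class_sizes → Pre_gen_proper_interval_with_twins N D twin_class_sizes → Spec_gen_proper_interval_with_twins N D twin_class_sizes (gen_proper_interval_with_twins N D twin_class_sizes)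

-- ===== LEMMAS AND PROOFS =====

-- the common value both builds compute: entry (i,j) is 1 iff i = j or |p_i - p_j| ≤ D
def pvSpecM (p : List Int) (D : Int) : List (List Int) :=
  (List.range p.length).map (fun i => (List.range p.length).map (fun j =>
    if i = j ∨ |p.getD i 0 - p.getD j 0| ≤ D then (1 : Int) else 0))

def pvCell (M : List (List Int)) (i j : Nat) : Int := (M.getD i []).getD j 0

def pvSh (n : Nat) (M : List (List Int)) : Prop := M.length = n ∧ ∀ row ∈ M, row.length = n

abbrev pvCond (p : List Int) (D : Int) (i j : Nat) : Prop := |p.getD i 0 - p.getD j 0| ≤ D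

theorem pvCond_symm (p : List Int) (D : Int) (i j : Nat) : pvCond p D i j ↔ pvCond p D j i := by
  unfold pvCond; rw [abs_sub_comm]

theorem pvSh_set1 {n : Nat} {M : List (List Int)} (h : pvSh n M) (i j : Nat) :
    pvSh n (pvSet1 M i j) := by
  obtain ⟨hl, hr⟩ := h
  by_cases hi : i < M.length
  · refine ⟨by simp [pvSet1, hl], ?_⟩
    intro row hrow
    rcases List.mem_or_eq_of_mem_set hrow with h1 | h1
    · exact hr row h1
    · subst h1
      rw [List.length_set, List.getD_eq_getElem _ _ hi]
      exact hr _ (List.getElem_mem hi)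
  · rw [pvSet1, List.set_eq_of_length_le (by omega)]
    exact ⟨hl, hr⟩

theorem pvCell_set1 {n : Nat} {M : List (List Int)} (h : pvSh n M) {a b : Nat}
    (ha : a < n) (hb : b < n) (i j : Nat) :
    pvCell (pvSet1 M a b) i j = if i = a ∧ j = b then 1 else pvCell M i j := by
  obtain ⟨hl, hr⟩ := h
  have hA : a < M.length := by omega
  have hrowlen : (M.getD a []).length = n := by
    rw [List.getD_eq_getElem _ _ hA]; exact hr _ (List.getElem_mem hA)
  have houter : (pvSet1 M a b).getD i [] = ((M.set a ((M.getD a []).set b 1))[i]?).getD [] := by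
    rw [pvSet1, List.getD_eq_getElem?_getD]
  by_cases hia : i = a
  · subst hia
    rw [pvCell, houter, List.getElem?_set_self hA, Option.getD_some]
    by_cases hjb : j = b
    · subst hjb
      rw [List.getD_eq_getElem?_getD, List.getElem?_set_self (by omega), Option.getD_some]
      simp
    · rw [List.getD_eq_getElem?_getD, List.getElem?_set_ne (fun hh => hjb hh.symm),
        ← List.getD_eq_getElem?_getD]
      simp [hjb, pvCell]
  · rw [pvCell, houter, List.getElem?_set_ne (fun hh => hia hh.symm), ← List.getD_eq_getElem?_getD]
    simp [hia, pvCell]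

-- the marked-cells predicate while processing outer index k, inner indices below m
abbrev pvG (p : List Int) (D : Int) (k m i j : Nat) : Prop :=
  (i = j ∧ i ≤ k) ∨
  (i ≠ j ∧ pvCond p D i j ∧ (i < k ∨ j < k ∨ (i = k ∧ j < m) ∨ (j = k ∧ i < m)))

-- the marked-cells predicate after the outer loop has processed indices below s
abbrev pvOI (p : List Int) (D : Int) (s i j : Nat) : Prop :=
  (i = j ∧ i < s) ∨ (i ≠ j ∧ pvCond p D i j ∧ (i < s ∨ j < s))

theorem pvG_succ_iff_of_cond (p : List Int) (D : Int) {k s : Nat} (hks : k < s)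
    (hcnd : pvCond p D k s) (i j : Nat) :
    pvG p D k (s + 1) i j ↔ ((i = s ∧ j = k) ∨ (i = k ∧ j = s) ∨ pvG p D k s i j) := by
  unfold pvG
  constructor
  · rintro (h | ⟨hne, hc, hm⟩)
    · exact Or.inr (Or.inr (Or.inl h))
    · by_cases h1 : i = s ∧ j = k
      · exact Or.inl h1
      · by_cases h2 : i = k ∧ j = s
        · exact Or.inr (Or.inl h2)
        · exact Or.inr (Or.inr (Or.inr ⟨hne, hc, by omega⟩))
  · rintro (⟨hi, hj⟩ | ⟨hi, hj⟩ | h)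
    · exact Or.inr ⟨by omega, by rw [hi, hj]; exact (pvCond_symm p D k s).mp hcnd, by omega⟩
    · exact Or.inr ⟨by omega, by rw [hi, hj]; exact hcnd, by omega⟩
    · rcases h with h | ⟨hne, hc, hm⟩
      · exact Or.inl h
      · exact Or.inr ⟨hne, hc, by omega⟩

theorem pvG_succ_iff_of_not_cond (p : List Int) (D : Int) {k s : Nat} (hks : k < s)
    (hnc : ¬ pvCond p D k s) (i j : Nat) :
    pvG p D k (s + 1) i j ↔ pvG p D k s i j := by
  unfold pvG
  constructor
  · rintro (h | ⟨hne, hc, hm⟩)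
    · exact Or.inl h
    · by_cases h1 : i = s ∧ j = k
      · refine absurd ((pvCond_symm p D k s).mpr ?_) hnc
        rw [← h1.1, ← h1.2]; exact hc
      · by_cases h2 : i = k ∧ j = s
        · refine absurd ?_ hnc
          rw [← h2.1, ← h2.2]; exact hc
        · exact Or.inr ⟨hne, hc, by omega⟩
  · rintro (h | ⟨hne, hc, hm⟩)
    · exact Or.inl h
    · exact Or.inr ⟨hne, hc, by omega⟩

theorem pvG_start_iff (p : List Int) (D : Int) (s i j : Nat) :
    pvG p D s (s + 1) i j ↔ ((i = s ∧ j = s) ∨ pvOI p D s i j) := by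
  unfold pvG pvOI
  constructor
  · rintro (⟨hij, hk⟩ | ⟨hne, hc, hm⟩)
    · by_cases hs : i = s
      · exact Or.inl ⟨hs, by omega⟩
      · exact Or.inr (Or.inl ⟨hij, by omega⟩)
    · exact Or.inr (Or.inr ⟨hne, hc, by omega⟩)
  · rintro (⟨h1, h2⟩ | ⟨hij, hk⟩ | ⟨hne, hc, hm⟩)
    · exact Or.inl ⟨by omega, by omega⟩
    · exact Or.inl ⟨hij, by omega⟩
    · exact Or.inr ⟨hne, hc, by omega⟩

theorem pvG_end_iff (p : List Int) (D : Int) {s n i j : Nat} (hs : s < n)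
    (hi : i < n) (hj : j < n) :
    pvG p D s n i j ↔ pvOI p D (s + 1) i j := by
  unfold pvG pvOI
  constructor
  · rintro (⟨hij, hk⟩ | ⟨hne, hc, hm⟩)
    · exact Or.inl ⟨hij, by omega⟩
    · exact Or.inr ⟨hne, hc, by omega⟩
  · rintro (⟨hij, hk⟩ | ⟨hne, hc, hm⟩)
    · exact Or.inl ⟨hij, by omega⟩
    · exact Or.inr ⟨hne, hc, by omega⟩

theorem pvInnerA (p : List Int) (D : Int) (k : Nat) (hk : k < p.length) :
    ∀ (len s : Nat) (M : List (List Int)), k < s → s + len = p.length → pvSh p.length M →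
    (∀ i j, i < p.length → j < p.length → pvCell M i j = if pvG p D k s i j then 1 else 0) →
    pvSh p.length ((List.range' s len).foldl
        (fun A jj => if |p.getD k 0 - p.getD jj 0| ≤ D then pvSet1 (pvSet1 A k jj) jj k else A) M) ∧
    (∀ i j, i < p.length → j < p.length →
      pvCell ((List.range' s len).foldl
        (fun A jj => if |p.getD k 0 - p.getD jj 0| ≤ D then pvSet1 (pvSet1 A k jj) jj k else A) M) i j
      = if pvG p D k p.length i j then 1 else 0) := by
  intro len
  induction len with
  | zero =>
      intro s M hks hs hSh hc
      have : s = p.length := by omega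
      subst this
      exact ⟨hSh, hc⟩
  | succ len ih =>
      intro s M hks hs hSh hc
      have hs' : s < p.length := by omega
      rw [List.range'_succ, List.foldl_cons]
      by_cases hcond : |p.getD k 0 - p.getD s 0| ≤ D
      · rw [if_pos hcond]
        refine ih (s + 1) _ (by omega) (by omega) (pvSh_set1 (pvSh_set1 hSh _ _) _ _) ?_
        intro i j hi hj
        rw [pvCell_set1 (pvSh_set1 hSh _ _) hs' hk, pvCell_set1 hSh hk hs', hc i j hi hj]
        have hiff := pvG_succ_iff_of_cond p D hks hcond i j
        by_cases h1 : i = s ∧ j = k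
        · rw [if_pos h1, if_pos (hiff.mpr (Or.inl h1))]
        · rw [if_neg h1]
          by_cases h2 : i = k ∧ j = s
          · rw [if_pos h2, if_pos (hiff.mpr (Or.inr (Or.inl h2)))]
          · rw [if_neg h2]
            by_cases h3 : pvG p D k s i j
            · rw [if_pos h3, if_pos (hiff.mpr (Or.inr (Or.inr h3)))]
            · rw [if_neg h3, if_neg (fun hh => by
                rcases hiff.mp hh with h | h | h
                exacts [h1 h, h2 h, h3 h])]
      · rw [if_neg hcond]
        refine ih (s + 1) _ (by omega) (by omega) hSh ?_
        intro i j hi hj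
        rw [hc i j hi hj]
        have hiff := pvG_succ_iff_of_not_cond p D hks hcond i j
        by_cases h3 : pvG p D k s i j
        · rw [if_pos h3, if_pos (hiff.mpr h3)]
        · rw [if_neg h3, if_neg (fun hh => h3 (hiff.mp hh))]

theorem pvOuterA (p : List Int) (D : Int) :
    ∀ (len s : Nat) (M : List (List Int)), s + len = p.length → pvSh p.length M →
    (∀ i j, i < p.length → j < p.length → pvCell M i j = if pvOI p D s i j then 1 else 0) →
    pvSh p.length ((List.range' s len).foldl
      (fun A i =>
        (List.range' (i + 1) (p.length - (i + 1))).foldl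
          (fun A j => if |p.getD i 0 - p.getD j 0| ≤ D then pvSet1 (pvSet1 A i j) j i else A)
          (pvSet1 A i i)) M) ∧
    (∀ i j, i < p.length → j < p.length →
      pvCell ((List.range' s len).foldl
        (fun A i =>
          (List.range' (i + 1) (p.length - (i + 1))).foldl
            (fun A j => if |p.getD i 0 - p.getD j 0| ≤ D then pvSet1 (pvSet1 A i j) j i else A)
            (pvSet1 A i i)) M) i j
      = if pvOI p D p.length i j then 1 else 0) := by
  intro len
  induction len with
  | zero =>
      intro s M hs hSh hc
      have : s = p.length := by omega
      subst this
      exact ⟨hSh, hc⟩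
  | succ len ih =>
      intro s M hs hSh hc
      have hs' : s < p.length := by omega
      rw [List.range'_succ, List.foldl_cons]
      have hM1 : ∀ i j, i < p.length → j < p.length →
          pvCell (pvSet1 M s s) i j = if pvG p D s (s + 1) i j then 1 else 0 := by
        intro i j hi hj
        rw [pvCell_set1 hSh hs' hs', hc i j hi hj]
        have hiff := pvG_start_iff p D s i j
        by_cases h1 : i = s ∧ j = s
        · rw [if_pos h1, if_pos (hiff.mpr (Or.inl h1))]
        · rw [if_neg h1]
          by_cases h2 : pvOI p D s i j
          · rw [if_pos h2, if_pos (hiff.mpr (Or.inr h2))]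
          · rw [if_neg h2, if_neg (fun hh => by
              rcases hiff.mp hh with h | h
              exacts [h1 h, h2 h])]
      obtain ⟨hSh2, hc2⟩ := pvInnerA p D s hs' (p.length - (s + 1)) (s + 1) (pvSet1 M s s)
        (by omega) (by omega) (pvSh_set1 hSh _ _) hM1
      refine ih (s + 1) _ (by omega) hSh2 ?_
      intro i j hi hj
      rw [hc2 i j hi hj]
      have hiff := pvG_end_iff p D hs' hi hj
      by_cases h3 : pvG p D s p.length i j
      · rw [if_pos h3, if_pos (hiff.mp h3)]
      · rw [if_neg h3, if_neg (fun hh => h3 (hiff.mpr hh))]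

theorem pvMatrix_eq_spec (p : List Int) (D : Int) {M : List (List Int)}
    (hSh : pvSh p.length M)
    (hc : ∀ i j, i < p.length → j < p.length →
      pvCell M i j = if pvOI p D p.length i j then 1 else 0) :
    M = pvSpecM p D := by
  obtain ⟨hl, hr⟩ := hSh
  apply List.ext_getElem
  · simp [pvSpecM, hl]
  · intro i hi hi'
    have hin : i < p.length := by omega
    have hrow : M[i].length = p.length := hr _ (List.getElem_mem (by omega))
    have hspec : (pvSpecM p D)[i] =
        (List.range p.length).map (fun j => if i = j ∨ |p.getD i 0 - p.getD j 0| ≤ D then (1:Int) else 0) := by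
      simp [pvSpecM, hin]
    rw [hspec]
    apply List.ext_getElem
    · simp [hrow]
    · intro j hj hj'
      have hjn : j < p.length := by omega
      have hMij : M[i][j] = pvCell M i j := by
        rw [pvCell, List.getD_eq_getElem _ _ (by omega : i < M.length)]
        rw [List.getD_eq_getElem _ _ (by omega : j < M[i].length)]
      rw [hMij, hc i j hin hjn]
      simp only [List.getElem_map, List.getElem_range]
      have hoi : pvOI p D p.length i j ↔ (i = j ∨ |p.getD i 0 - p.getD j 0| ≤ D) := by
        unfold pvOI pvCond
        constructor
        · rintro (⟨h, _⟩ | ⟨_, h, _⟩)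
          exacts [Or.inl h, Or.inr h]
        · rintro (h | h)
          · exact Or.inl ⟨h, hin⟩
          · by_cases hij : i = j
            · exact Or.inl ⟨hij, hin⟩
            · exact Or.inr ⟨hij, h, Or.inl hin⟩
      by_cases h : pvOI p D p.length i j
      · rw [if_pos h, if_pos (hoi.mp h)]
      · rw [if_neg h, if_neg (fun hh => h (hoi.mpr hh))]

theorem specA (p : List Int) (D : Int) :
    gen_proper_interval_from_positions p D = pvSpecM p D := by
  simp only [gen_proper_interval_from_positions]
  have h0Sh : pvSh p.length (List.replicate p.length (List.replicate p.length (0:Int))) := by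
    constructor
    · simp
    · intro row hrow
      rw [List.eq_of_mem_replicate hrow]; simp
  have h0c : ∀ i j, i < p.length → j < p.length →
      pvCell (List.replicate p.length (List.replicate p.length (0:Int))) i j
        = if pvOI p D 0 i j then 1 else 0 := by
    intro i j hi hj
    have hz : pvCell (List.replicate p.length (List.replicate p.length (0:Int))) i j = 0 := by
      simp [pvCell, List.getD_eq_getElem?_getD, hi, hj]
    rw [hz, if_neg (by rintro (⟨_, h⟩ | ⟨_, _, h | h⟩) <;> omega)]
  obtain ⟨hSh, hc⟩ := pvOuterA p D p.length 0 _ (by omega) h0Sh h0c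
  rw [List.range_eq_range']
  exact pvMatrix_eq_spec p D hSh (by
    intro i j hi hj
    exact hc i j hi hj)

-- ---------- B side ----------

-- generic facts about the rank-building fold (rank[order[a]] = a)
theorem pvFoldSet_getD_of_ne (f : Nat → Nat) :
    ∀ (L : List Nat) (rk : List Nat) (t : Nat), (∀ a ∈ L, f a ≠ t) →
      (L.foldl (fun rk a => rk.set (f a) a) rk).getD t 0 = rk.getD t 0 := by
  intro L
  induction L with
  | nil => intro rk t _; rfl
  | cons a L ih =>
      intro rk t h
      rw [List.foldl_cons, ih _ _ (fun x hx => h x (List.mem_cons_of_mem a hx))]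
      rw [List.getD_eq_getElem?_getD, List.getElem?_set_ne (h a (List.mem_cons_self)),
        ← List.getD_eq_getElem?_getD]

theorem pvFoldSet_getD (f : Nat → Nat) :
    ∀ (L : List Nat) (rk : List Nat) (a0 : Nat),
      L.Pairwise (fun a b => f a ≠ f b) → a0 ∈ L → f a0 < rk.length →
      (L.foldl (fun rk a => rk.set (f a) a) rk).getD (f a0) 0 = a0 := by
  intro L
  induction L with
  | nil => intro rk a0 _ h; exact absurd h (List.not_mem_nil)
  | cons a L ih =>
      intro rk a0 hp ha0 hlen
      rw [List.foldl_cons]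
      rcases List.mem_cons.mp ha0 with rfl | ha0'
      · rw [pvFoldSet_getD_of_ne f L _ _ (fun x hx => (List.pairwise_cons.mp hp).1 x hx |>.symm)]
        rw [List.getD_eq_getElem?_getD, List.getElem?_set_self hlen, Option.getD_some]
      · exact ih _ a0 (List.pairwise_cons.mp hp).2 ha0' (by simpa using hlen)

-- specification of the two-pointer while loop
theorem pvAdvance_spec (q : List Int) (n : Nat) (D qa : Int) :
    ∀ (fuel r0 : Nat), n - r0 ≤ fuel → r0 < n →
      r0 ≤ pvAdvance q n D qa r0 ∧ pvAdvance q n D qa r0 < n ∧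
      (∀ b, r0 < b → b ≤ pvAdvance q n D qa r0 → q.getD b 0 - qa ≤ D) ∧
      (pvAdvance q n D qa r0 + 1 < n → ¬(q.getD (pvAdvance q n D qa r0 + 1) 0 - qa ≤ D)) := by
  intro fuel
  induction fuel with
  | zero => intro r0 h1 h2; omega
  | succ fuel ih =>
      intro r0 h1 h2
      rw [pvAdvance]
      by_cases h : r0 + 1 < n ∧ q.getD (r0 + 1) 0 - qa ≤ D
      · rw [dif_pos h]
        obtain ⟨g1, g2, g3, g4⟩ := ih (r0 + 1) (by omega) h.1
        refine ⟨by omega, g2, ?_, g4⟩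
        intro b hb1 hb2
        rcases Nat.lt_or_ge r0.succ b with hb | hb
        · exact g3 b hb hb2
        · have : b = r0 + 1 := by omega
          rw [this]; exact h.2
      · rw [dif_neg h]
        refine ⟨le_refl _, h2, by omega, ?_⟩
        intro hlt hc
        exact h ⟨hlt, hc⟩

-- what the reach fold establishes for every index
abbrev pvRSpec (q : List Int) (D : Int) (n a e : Nat) : Prop :=
  a ≤ e ∧ e < n ∧ (∀ b, a < b → b ≤ e → q.getD b 0 - q.getD a 0 ≤ D) ∧
  (∀ b, e < b → b < n → ¬(q.getD b 0 - q.getD a 0 ≤ D))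

theorem pvReach_fold (q : List Int) (D : Int) (n : Nat)
    (hmono : ∀ a b : Nat, a ≤ b → b < n → q.getD a 0 ≤ q.getD b 0) :
    ∀ (len sidx : Nat) (st : List Nat × Nat), sidx + len = n →
    st.1.length = n → (∀ a, a < sidx → pvRSpec q D n a (st.1.getD a 0)) →
    (0 < sidx → pvRSpec q D n (sidx - 1) st.2) → (sidx = 0 → st.2 = 0) →
    ((List.range' sidx len).foldl
      (fun (st : List Nat × Nat) a =>
        (st.1.set a (pvAdvance q n D (q.getD a 0) (max st.2 a)),
          pvAdvance q n D (q.getD a 0) (max st.2 a))) st).1.length = n ∧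
    (∀ a, a < n → pvRSpec q D n a
      (((List.range' sidx len).foldl
        (fun (st : List Nat × Nat) a =>
          (st.1.set a (pvAdvance q n D (q.getD a 0) (max st.2 a)),
            pvAdvance q n D (q.getD a 0) (max st.2 a))) st).1.getD a 0)) := by
  intro len
  induction len with
  | zero =>
      intro sidx st hlen hst hdone _ _
      have : sidx = n := by omega
      subst this
      exact ⟨hst, fun a ha => hdone a ha⟩
  | succ len ih =>
      intro sidx st hlen hst hdone hlast hzero
      have hsn : sidx < n := by omega
      rw [List.range'_succ, List.foldl_cons]
      have hr0lt : max st.2 sidx < n := by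
        rcases Nat.eq_zero_or_pos sidx with h0 | h0
        · have := hzero h0; omega
        · have := (hlast h0).2.1; omega
      have hsound0 : ∀ b, sidx < b → b ≤ max st.2 sidx → q.getD b 0 - q.getD sidx 0 ≤ D := by
        intro b hb1 hb2
        rcases Nat.eq_zero_or_pos sidx with h0 | h0
        · have := hzero h0; omega
        · obtain ⟨_, he, hs, _⟩ := hlast h0
          have hb2' : b ≤ st.2 := by omega
          have h1 := hs b (by omega) hb2'
          have h2 := hmono (sidx - 1) sidx (by omega) hsn
          linarith
      obtain ⟨g1, g2, g3, g4⟩ :=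
        pvAdvance_spec q n D (q.getD sidx 0) n (max st.2 sidx) (by omega) hr0lt
      have hRS : pvRSpec q D n sidx (pvAdvance q n D (q.getD sidx 0) (max st.2 sidx)) := by
        refine ⟨by omega, g2, ?_, ?_⟩
        · intro b hb1 hb2
          rcases Nat.lt_or_ge (max st.2 sidx) b with hb | hb
          · exact g3 b hb hb2
          · exact hsound0 b hb1 hb
        · intro b hb1 hb2
          have hx := g4 (by omega)
          have hy := hmono (pvAdvance q n D (q.getD sidx 0) (max st.2 sidx) + 1) b (by omega) hb2
          intro hc
          exact hx (by linarith)
      refine ih (sidx + 1) _ (by omega) (by simpa using hst) ?_ ?_ (by omega)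
      · intro a ha
        rcases Nat.lt_or_ge a sidx with h | h
        · rw [List.getD_eq_getElem?_getD, List.getElem?_set_ne (by omega),
            ← List.getD_eq_getElem?_getD]
          exact hdone a h
        · have : a = sidx := by omega
          subst this
          rw [List.getD_eq_getElem?_getD, List.getElem?_set_self (by omega), Option.getD_some]
          exact hRS
      · intro _
        simpa using hRS

theorem specB (N : Int) (D : Int) (s : List Int) :
    gen_proper_interval_with_twins_alt N D s = pvSpecM (pvPositions D s) D := by
  simp only [gen_proper_interval_with_twins_alt]
  set p := pvPositions D s with hpdef
  set ord := PySem.List.sorted (List.range p.length) (fun i => p.getD i 0) false with horddef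
  -- order facts
  have hperm : ord.Perm (List.range p.length) := PySem.List.sorted_perm _ _ _
  have hordlen : ord.length = p.length := by
    have := hperm.length_eq; simpa using this
  have hordmem : ∀ x ∈ ord, x < p.length := by
    intro x hx
    exact List.mem_range.mp (hperm.mem_iff.mp hx)
  have hordnd : ord.Nodup := hperm.nodup_iff.mpr (List.nodup_range)
  set q := ord.map (fun i => p.getD i 0) with hqdef
  have hqlen : q.length = p.length := by rw [hqdef, List.length_map, hordlen]
  have hqget : ∀ a : Nat, a < p.length → q.getD a 0 = p.getD (ord.getD a 0) 0 := by
    intro a ha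
    have h1 : a < ord.length := by omega
    have h2 : ord.getD a 0 = ord[a] := List.getD_eq_getElem ord 0 h1
    have h3 : q.getD a 0 = ((List.map (fun i => p.getD i 0) ord)[a]?).getD 0 := by
      rw [hqdef, List.getD_eq_getElem?_getD]
    rw [h3, List.getElem?_map, List.getElem?_eq_getElem h1, Option.map_some, Option.getD_some, h2]
  have hmono : ∀ a b : Nat, a ≤ b → b < p.length → q.getD a 0 ≤ q.getD b 0 := by
    intro a b hab hb
    rcases Nat.eq_or_lt_of_le hab with rfl | hlt
    · exact le_refl _
    · have hpw : q.Pairwise (fun x y : Int => x ≤ y) := by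
        rw [hqdef]
        exact List.Pairwise.map _ (fun _ _ h => h) (PySem.List.sorted_pairwise _ _)
      have := List.pairwise_iff_getElem.mp hpw a b (by omega) (by omega) hlt
      rw [List.getD_eq_getElem _ _ (by omega), List.getD_eq_getElem _ _ (by omega)]
      exact this
  -- rank facts
  set rank := (List.range p.length).foldl (fun rk a => rk.set (ord.getD a 0) a)
      (List.replicate p.length 0) with hrankdef
  have hrank : ∀ a : Nat, a < p.length → rank.getD (ord.getD a 0) 0 = a := by
    intro a ha
    rw [hrankdef]
    refine pvFoldSet_getD (fun a => ord.getD a 0) (List.range p.length) _ a ?_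
      (List.mem_range.mpr ha) ?_
    · refine List.pairwise_iff_getElem.mpr ?_
      intro x y hx hy hxy
      rw [List.length_range] at hx hy
      simp only [List.getElem_range]
      rw [List.getD_eq_getElem _ _ (by omega : x < ord.length),
        List.getD_eq_getElem _ _ (by omega : y < ord.length)]
      intro he
      exact absurd ((List.Nodup.getElem_inj_iff hordnd).mp he) (by omega)
    · rw [List.length_replicate]
      have : ord.getD a 0 ∈ ord := by
        rw [List.getD_eq_getElem _ _ (by omega : a < ord.length)]
        exact List.getElem_mem _
      exact hordmem _ this
  -- reach facts
  obtain ⟨hreachlen, hreach⟩ := pvReach_fold q D p.length hmono p.length 0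
    (List.replicate p.length 0, 0) (by omega) (by simp) (by omega) (by omega) (fun _ => rfl)
  rw [← List.range_eq_range'] at hreach
  -- entrywise equality
  rw [pvSpecM]
  refine List.map_congr_left ?_
  intro i hi
  have hin : i < p.length := List.mem_range.mp hi
  refine List.map_congr_left ?_
  intro j hj
  have hjn : j < p.length := List.mem_range.mp hj
  -- the window test in sorted coordinates
  have core : ∀ (a b i j : Nat), a < b → b < p.length → ord.getD a 0 = i → ord.getD b 0 = j →
      ((b ≤ ((List.range p.length).foldl
          (fun (st : List Nat × Nat) a =>
            (st.1.set a (pvAdvance q p.length D (q.getD a 0) (max st.2 a)),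
              pvAdvance q p.length D (q.getD a 0) (max st.2 a)))
          (List.replicate p.length 0, 0)).1.getD a 0) ↔ |p.getD i 0 - p.getD j 0| ≤ D) := by
    intro a b i j hab hb hia hjb
    obtain ⟨he1, he2, hsound, hcomp⟩ := hreach a (by omega)
    have hqa : q.getD a 0 = p.getD i 0 := by rw [hqget a (by omega), hia]
    have hqb : q.getD b 0 = p.getD j 0 := by rw [hqget b hb, hjb]
    have hle : q.getD a 0 ≤ q.getD b 0 := hmono a b (by omega) hb
    have habs : |p.getD i 0 - p.getD j 0| = q.getD b 0 - q.getD a 0 := by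
      rw [← hqa, ← hqb, abs_sub_comm, abs_of_nonneg (by linarith)]
    constructor
    · intro h
      rw [habs]
      exact hsound b hab h
    · intro h
      by_contra hcon
      exact hcomp b (by omega) hb (by rw [← habs]; exact h)
  have hiff : (i = j ∨ max (rank.getD i 0) (rank.getD j 0) ≤
      ((List.range p.length).foldl
        (fun (st : List Nat × Nat) a =>
          (st.1.set a (pvAdvance q p.length D (q.getD a 0) (max st.2 a)),
            pvAdvance q p.length D (q.getD a 0) (max st.2 a)))
        (List.replicate p.length 0, 0)).1.getD
          (min (rank.getD i 0) (rank.getD j 0)) 0)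
      ↔ (i = j ∨ |p.getD i 0 - p.getD j 0| ≤ D) := by
    by_cases hij : i = j
    · simp [hij]
    · have hmemi : i ∈ ord := hperm.mem_iff.mpr (List.mem_range.mpr hin)
      have hmemj : j ∈ ord := hperm.mem_iff.mpr (List.mem_range.mpr hjn)
      obtain ⟨a, halt, hia⟩ := List.getElem_of_mem hmemi
      obtain ⟨b, hblt, hjb⟩ := List.getElem_of_mem hmemj
      have hia' : ord.getD a 0 = i := by rw [List.getD_eq_getElem _ _ halt, hia]
      have hjb' : ord.getD b 0 = j := by rw [List.getD_eq_getElem _ _ hblt, hjb]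
      have hri : rank.getD i 0 = a := by rw [← hia']; exact hrank a (by omega)
      have hrj : rank.getD j 0 = b := by rw [← hjb']; exact hrank b (by omega)
      have hane : a ≠ b := by
        intro h; rw [h, hjb'] at hia'; exact hij hia'.symm
      rw [hri, hrj]
      constructor
      · rintro (h | h)
        · exact Or.inl h
        · rcases Nat.lt_or_ge a b with hab | hab
          · rw [(by omega : max a b = b), (by omega : min a b = a)] at h
            exact Or.inr ((core a b i j hab (by omega) hia' hjb').mp h)
          · have hba : b < a := by omega
            rw [(by omega : max a b = a), (by omega : min a b = b)] at h
            have := (core b a j i hba (by omega) hjb' hia').mp h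
            exact Or.inr (by rw [abs_sub_comm]; exact this)
      · rintro (h | h)
        · exact Or.inl h
        · refine Or.inr ?_
          rcases Nat.lt_or_ge a b with hab | hab
          · rw [(by omega : max a b = b), (by omega : min a b = a)]
            exact (core a b i j hab (by omega) hia' hjb').mpr h
          · have hba : b < a := by omega
            rw [(by omega : max a b = a), (by omega : min a b = b)]
            exact (core b a j i hba (by omega) hjb' hia').mpr (by rw [abs_sub_comm]; exact h)
  exact if_congr hiff rfl rfl

-- ===== VERDICT (by name: the statement is the Claim_ definition above) =====
theorem gen_proper_interval_with_twins_spec : Claim_equal_gen_proper_interval_with_twins := by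
  intro N D s _ _
  show _ = _
  rw [gen_proper_interval_with_twins, specA, specB]
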